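-- pv_equiv track=rewrite | github.com/TarunShaji/GSC_QuickView | backend/src/device_visibility_analyzer.py | split_by_device
-- ===== SOURCE A (Python) =====
-- from typing import Any, Dict, List
--
-- def split_by_device(metrics: List[Dict[str, Any]]) -> Dict[str, List[Dict[str, Any]]]:
--     """Group raw metrics by device type"""
--     device_groups = {
--         'desktop': [],
--         'mobile': [],
--         'tablet': []
--     }
--
--     for metric in metrics:
--         device = metric.get('device', '').lower()
--         if device in device_groups:
--             device_groups[device].append(metric)
--
--     return device_groups
-- ===== SOURCE B (Python) =====
-- def split_by_device(metrics):
--     # Three independent filtering passes (one per fixed bucket) instead of one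
--     # loop with a membership test into a mutable dict of lists.
--     return {d: [m for m in metrics if m.get('device', '').lower() == d]
--             for d in ('desktop', 'mobile', 'tablet')}
-- ===== Notes on version B (the rewrite author's own statement) =====
-- stated objective: alternative
-- what changed: Replaces the single pass that dispatches each metric into a mutable dict of three lists by a dict comprehension that filters the input once per fixed bucket (desktop/mobile/tablet), with no membership test and no mutation.
import Mathlib
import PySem

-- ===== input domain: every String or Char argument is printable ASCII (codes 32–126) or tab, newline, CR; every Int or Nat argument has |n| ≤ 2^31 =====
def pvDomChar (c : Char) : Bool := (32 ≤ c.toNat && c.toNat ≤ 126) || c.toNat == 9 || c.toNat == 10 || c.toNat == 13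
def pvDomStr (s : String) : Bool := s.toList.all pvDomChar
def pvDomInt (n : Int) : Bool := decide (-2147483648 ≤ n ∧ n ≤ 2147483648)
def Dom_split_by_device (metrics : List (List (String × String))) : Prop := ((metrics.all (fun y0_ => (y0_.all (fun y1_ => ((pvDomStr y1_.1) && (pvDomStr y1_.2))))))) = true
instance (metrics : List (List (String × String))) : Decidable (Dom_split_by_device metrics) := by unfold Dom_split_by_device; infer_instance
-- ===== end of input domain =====

-- B replaces A's single dispatching pass into a mutable dict of lists by one
-- filtering pass per fixed bucket (alternative decomposition, same cost class).


-- ===== PORT A =====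
-- metric.get('device', '').lower()  (shared verbatim subexpression of both Pythons)
def pvDevice (metric : List (String × String)) : String :=
  PySem.Str.lower ((PySem.Dict.mk metric).getD "device" "")

def split_by_device (metrics : List (List (String × String))) : List (String × List (List (String × String))) :=
  let device_groups : PySem.Dict String (List (List (String × String))) :=
    ((PySem.Dict.empty.insert "desktop" []).insert "mobile" []).insert "tablet" []
  (metrics.foldl (fun dg metric =>
      let device := pvDevice metric
      if dg.contains device then dg.modify device [] (fun l => l ++ [metric]) else dg)
    device_groups).items

-- ===== PORT B =====
def split_by_device_alt (metrics : List (List (String × String))) : List (String × List (List (String × String))) :=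
  ["desktop", "mobile", "tablet"].map
    (fun d => (d, metrics.filter (fun m => pvDevice m == d)))

-- ===== PRECONDITION & SPEC =====
def Spec_split_by_device (metrics : List (List (String × String))) (out : List (String × List (List (String × String)))) : Prop := out = split_by_device_alt metrics
instance (metrics : List (List (String × String))) (out : List (String × List (List (String × String)))) : Decidable (Spec_split_by_device metrics out) := by unfold Spec_split_by_device; infer_instance

-- ===== CLAIM (what is proved, stated in full; the proofs are below) =====
def Claim_equal_split_by_device : Prop := ∀ (metrics : List (List (String × String))), Dom_split_by_device metrics → Spec_split_by_device metrics (split_by_device metrics)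

-- ===== LEMMAS AND PROOFS =====

-- one step of A's loop on the three-bucket dict, as a dict literal
lemma step_eq (a b c : List (List (String × String))) (m : List (String × String)) :
    (if (PySem.Dict.mk [("desktop", a), ("mobile", b), ("tablet", c)]).contains (pvDevice m)
      then (PySem.Dict.mk [("desktop", a), ("mobile", b), ("tablet", c)]).modify (pvDevice m) [] (fun l => l ++ [m])
      else PySem.Dict.mk [("desktop", a), ("mobile", b), ("tablet", c)]) =
    PySem.Dict.mk [("desktop", if pvDevice m = "desktop" then a ++ [m] else a),
                   ("mobile", if pvDevice m = "mobile" then b ++ [m] else b),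
                   ("tablet", if pvDevice m = "tablet" then c ++ [m] else c)] := by
  by_cases h1 : pvDevice m = "desktop" <;> by_cases h2 : pvDevice m = "mobile" <;>
    by_cases h3 : pvDevice m = "tablet" <;>
    simp_all [PySem.Dict.contains, PySem.Dict.modify, PySem.Dict.insert, PySem.Dict.getD,
      PySem.Dict.get?] <;>
    (rintro (h | h | h) <;> simp_all)

-- A's loop from any three-bucket state appends the per-bucket filters
lemma fold_items (metrics : List (List (String × String)))
    (a b c : List (List (String × String))) :
    (metrics.foldl (fun dg metric =>
        let device := pvDevice metric
        if PySem.Dict.contains dg device then dg.modify device [] (fun l => l ++ [metric]) else dg)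
      (PySem.Dict.mk [("desktop", a), ("mobile", b), ("tablet", c)])).items =
    [("desktop", a ++ metrics.filter (fun m => pvDevice m == "desktop")),
     ("mobile", b ++ metrics.filter (fun m => pvDevice m == "mobile")),
     ("tablet", c ++ metrics.filter (fun m => pvDevice m == "tablet"))] := by
  induction metrics generalizing a b c with
  | nil => simp
  | cons m ms ih =>
    rw [List.foldl_cons]
    simp only []
    rw [step_eq, ih]
    simp only [List.filter_cons]
    by_cases h1 : pvDevice m = "desktop" <;> by_cases h2 : pvDevice m = "mobile" <;>
      by_cases h3 : pvDevice m = "tablet" <;> simp_all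

-- ===== VERDICT (by name: the statement is the Claim_ definition above) =====
theorem split_by_device_spec : Claim_equal_split_by_device := by
  intro metrics _
  show split_by_device metrics = split_by_device_alt metrics
  unfold split_by_device split_by_device_alt
  rw [show ((PySem.Dict.empty.insert "desktop" ([] : List (List (String × String)))).insert "mobile" []).insert "tablet" [] =
      PySem.Dict.mk [("desktop", []), ("mobile", []), ("tablet", [])] from rfl]
  rw [fold_items]
  simp
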